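-- pv_equiv track=rewrite | github.com/traagel/pdf-extractor | src/processing/chapter_processor.py | _clean_spaced_text
-- ===== SOURCE A (Python) =====
-- def _clean_spaced_text(line: str) -> str:
--     """Clean text that has spaces between letters."""
--     # Split into words
--     words = line.split()
--     cleaned_words = []
--     current_word = []
--
--     for word in words:
--         # If word is a single letter
--         if len(word) == 1 and word.isalpha():
--             current_word.append(word)
--         else:
--             # If we have collected letters, join them
--             if current_word:
--                 cleaned_words.append(''.join(current_word))
--                 current_word = []
--             cleaned_words.append(word)
--
--     if current_word:
--         cleaned_words.append(''.join(current_word))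
--
--     return ' '.join(cleaned_words)
-- ===== SOURCE B (Python) =====
-- def _clean_spaced_text(line: str) -> str:
--     """Clean text that has spaces between letters."""
--     words = line.split()
--     out = []
--     i, n = 0, len(words)
--     while i < n:
--         w = words[i]
--         if len(w) == 1 and w.isalpha():
--             # scan the whole run of single letters and join it in one step
--             j = i + 1
--             while j < n and len(words[j]) == 1 and words[j].isalpha():
--                 j += 1
--             out.append(''.join(words[i:j]))
--             i = j
--         else:
--             out.append(w)
--             i += 1
--     return ' '.join(out)
-- ===== Notes on version B (the rewrite author's own statement) =====
-- stated objective: alternative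
-- what changed: Replaces A's stateful accumulator (current_word list with flushes inside the loop and after it) by a run-scanning two-pointer loop: each maximal run of single letters is located with an inner scan and joined in one step, so there is no pending state and no post-loop flush.
import Mathlib
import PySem

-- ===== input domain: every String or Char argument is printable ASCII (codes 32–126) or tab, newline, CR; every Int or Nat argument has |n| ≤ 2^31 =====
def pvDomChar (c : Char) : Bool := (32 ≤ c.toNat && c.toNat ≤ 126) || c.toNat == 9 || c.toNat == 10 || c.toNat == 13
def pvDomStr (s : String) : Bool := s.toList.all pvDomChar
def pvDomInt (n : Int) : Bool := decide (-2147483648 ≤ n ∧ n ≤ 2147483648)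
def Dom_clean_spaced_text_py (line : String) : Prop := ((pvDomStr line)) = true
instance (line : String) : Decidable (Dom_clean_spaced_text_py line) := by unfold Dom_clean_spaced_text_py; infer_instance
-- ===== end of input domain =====

-- B replaces A's pending-letters accumulator and post-loop flush by a run-scanning
-- two-pointer loop that joins each maximal run of single letters in one step (alternative, same cost).

-- the single-letter test both Pythons write literally: len(w) == 1 and w.isalpha()
def pvIsSingle (w : List Char) : Bool := w.length == 1 && PySem.Chars.strIsalpha w

-- ===== PORT A =====
-- A's loop body: state = (cleaned_words, current_word)
def pvStepA (st : List (List Char) × List (List Char)) (word : List Char) :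
    List (List Char) × List (List Char) :=
  if pvIsSingle word then
    (st.1, st.2 ++ [word])
  else
    ((if st.2 ≠ [] then st.1 ++ [PySem.Chars.join [] st.2] else st.1) ++ [word], [])

def clean_spaced_text_py (line : String) : String :=
  let words := PySem.Chars.split₀ line.toList
  let st := words.foldl pvStepA ([], [])
  let cleaned := if st.2 ≠ [] then st.1 ++ [PySem.Chars.join [] st.2] else st.1
  String.ofList (PySem.Chars.join [' '] cleaned)

-- ===== PORT B =====
-- outer while loop = recursion; inner while scanning a run = takeWhile/dropWhile
def pvRuns : List (List Char) → List (List Char)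
  | [] => []
  | w :: ws =>
    if pvIsSingle w then
      PySem.Chars.join [] (w :: ws.takeWhile pvIsSingle) :: pvRuns (ws.dropWhile pvIsSingle)
    else
      w :: pvRuns ws
termination_by ws => ws.length
decreasing_by
  · have := List.length_dropWhile_le pvIsSingle ws; simp; omega
  · simp

def clean_spaced_text_py_alt (line : String) : String :=
  String.ofList (PySem.Chars.join [' '] (pvRuns (PySem.Chars.split₀ line.toList)))

-- ===== PRECONDITION & SPEC =====
def Spec_clean_spaced_text_py (line : String) (out : String) : Prop := out = clean_spaced_text_py_alt line
instance (line : String) (out : String) : Decidable (Spec_clean_spaced_text_py line out) := by unfold Spec_clean_spaced_text_py; infer_instance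

-- ===== CLAIM (what is proved, stated in full; the proofs are below) =====
def Claim_equal_clean_spaced_text_py : Prop := ∀ (line : String), Dom_clean_spaced_text_py line → Spec_clean_spaced_text_py line (clean_spaced_text_py line)

-- ===== LEMMAS AND PROOFS =====

-- A's flush + tail of the loop, as a function of the pending letters
def pvFlush (st : List (List Char) × List (List Char)) : List (List Char) :=
  if st.2 ≠ [] then st.1 ++ [PySem.Chars.join [] st.2] else st.1

def pvArun (ws cur : List (List Char)) : List (List Char) :=
  pvFlush (ws.foldl pvStepA ([], cur))

-- already-cleaned words are a passive prefix of A's loop state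
lemma pvFoldl_prefix (ws : List (List Char)) (cl cur : List (List Char)) :
    ws.foldl pvStepA (cl, cur)
      = (cl ++ (ws.foldl pvStepA ([], cur)).1, (ws.foldl pvStepA ([], cur)).2) := by
  induction ws generalizing cl cur with
  | nil => simp
  | cons w ws ih =>
    simp only [List.foldl_cons, pvStepA]
    by_cases h : pvIsSingle w = true
    · simp only [h, if_true]
      rw [ih cl (cur ++ [w]), ih [] (cur ++ [w])]
    · have hb : pvIsSingle w = false := by simpa using h
      simp only [hb, Bool.false_eq_true, if_false]
      rw [ih ((if cur ≠ [] then cl ++ [PySem.Chars.join [] cur] else cl) ++ [w]) [],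
          ih ((if cur ≠ [] then [] ++ [PySem.Chars.join [] cur] else []) ++ [w]) []]
      cases hc : cur <;> simp

lemma pvFlush_foldl (ws cl cur : List (List Char)) :
    pvFlush (ws.foldl pvStepA (cl, cur)) = cl ++ pvArun ws cur := by
  rw [pvFoldl_prefix, pvArun, pvFlush, pvFlush]
  split <;> simp

-- pvRuns re-expressed through the first run
lemma pvRuns_char (ws : List (List Char)) :
    (if ws.takeWhile pvIsSingle = [] then pvRuns (ws.dropWhile pvIsSingle)
     else PySem.Chars.join [] (ws.takeWhile pvIsSingle) :: pvRuns (ws.dropWhile pvIsSingle))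
      = pvRuns ws := by
  cases ws with
  | nil => simp [pvRuns]
  | cons w ws =>
    by_cases h : pvIsSingle w = true
    · simp [h, pvRuns]
    · simp [h, pvRuns]

-- master invariant: A's remaining loop with pending letters cur equals B's runs
lemma pvArun_eq (ws : List (List Char)) (cur : List (List Char)) :
    pvArun ws cur
      = (if cur ++ ws.takeWhile pvIsSingle = [] then pvRuns (ws.dropWhile pvIsSingle)
         else PySem.Chars.join [] (cur ++ ws.takeWhile pvIsSingle)
              :: pvRuns (ws.dropWhile pvIsSingle)) := by
  induction ws generalizing cur with
  | nil =>
    simp only [List.takeWhile_nil, List.dropWhile_nil, List.append_nil]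
    rw [pvArun]; simp only [List.foldl_nil, pvFlush, pvRuns]
    cases cur <;> simp
  | cons w ws ih =>
    by_cases h : pvIsSingle w = true
    · have step : pvArun (w :: ws) cur = pvArun ws (cur ++ [w]) := by
        rw [pvArun, pvArun]
        simp [List.foldl_cons, pvStepA, h]
      rw [step, ih (cur ++ [w])]
      simp [h]
    · have step : pvArun (w :: ws) cur
          = ((if cur ≠ [] then [PySem.Chars.join [] cur] else []) ++ [w]) ++ pvArun ws [] := by
        rw [pvArun]
        simp only [List.foldl_cons, pvStepA, h]
        rw [← pvFlush_foldl ws _ []]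
        cases hc : cur <;> simp
      rw [step, ih [], List.nil_append, pvRuns_char]
      have hr : pvRuns (w :: ws) = w :: pvRuns ws := by simp [pvRuns, h]
      simp [h, hr]
      cases cur <;> simp

lemma pvArun_nil_eq (ws : List (List Char)) : pvArun ws [] = pvRuns ws := by
  rw [pvArun_eq, List.nil_append, pvRuns_char]

-- ===== VERDICT (by name: the statement is the Claim_ definition above) =====
theorem clean_spaced_text_py_spec : Claim_equal_clean_spaced_text_py := by
  intro line _
  unfold Spec_clean_spaced_text_py clean_spaced_text_py clean_spaced_text_py_alt
  have := pvArun_nil_eq (PySem.Chars.split₀ line.toList)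
  rw [pvArun, pvFlush] at this
  simp only []
  rw [← this]
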